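-- pv_equiv track=rewrite | github.com/tian1327/Accord-RL | BPBGClass_4+4/Contextual/Contextual_test.py | generate_code_dict
-- ===== SOURCE A (Python) =====
-- from itertools import combinations
--
-- def generate_code_dict(features):
--     code_dict = {}
--
--     # Generate all possible combinations of indices
--     for r in range(1, len(features) + 1):
--         combinations_list = list(combinations(range(len(features)), r))
--
--         # Generate code and corresponding value for each combination
--         for combination in combinations_list:
--             code = ['0'] * len(features)
--             value = []
--             for index in combination:
--                 code[index] = '1'
--                 value.append(features[index])
--
--             code_dict[''.join(code)] = value
--
--     # Add '00000000' code with None value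
--     code_dict['00000000'] = ["BPBGClass_None"]
--
--     return code_dict
-- ===== SOURCE B (Python) =====
-- def generate_code_dict(features):
--     # table[r] = all (code, value) rows for the size-r subsets of the current
--     # suffix, in the same order as lexicographic combinations; built
--     # right-to-left over the feature list by prefixing '1'/'0'
--     table = [[("", [])]]
--     for f in reversed(features):
--         new = [[("0" + c, v) for (c, v) in table[0]]]
--         for r in range(1, len(table) + 1):
--             ones = [("1" + c, [f] + v) for (c, v) in table[r - 1]]
--             zeros = [("0" + c, v) for (c, v) in table[r]] if r < len(table) else []
--             new.append(ones + zeros)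
--         table = new
--     code_dict = {}
--     for r in range(1, len(features) + 1):
--         for code, value in table[r]:
--             code_dict[code] = value
--     code_dict["00000000"] = ["BPBGClass_None"]
--     return code_dict
-- ===== Notes on version B (the rewrite author's own statement) =====
-- stated objective: alternative
-- what changed: Replaces itertools.combinations of index tuples plus per-subset char-array mutation and index lookups with a bottom-up dynamic-programming table over the feature list that builds each (code string, value list) row once by prefixing '1'/'0', keeping the exact by-size lexicographic insertion order.
import Mathlib
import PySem

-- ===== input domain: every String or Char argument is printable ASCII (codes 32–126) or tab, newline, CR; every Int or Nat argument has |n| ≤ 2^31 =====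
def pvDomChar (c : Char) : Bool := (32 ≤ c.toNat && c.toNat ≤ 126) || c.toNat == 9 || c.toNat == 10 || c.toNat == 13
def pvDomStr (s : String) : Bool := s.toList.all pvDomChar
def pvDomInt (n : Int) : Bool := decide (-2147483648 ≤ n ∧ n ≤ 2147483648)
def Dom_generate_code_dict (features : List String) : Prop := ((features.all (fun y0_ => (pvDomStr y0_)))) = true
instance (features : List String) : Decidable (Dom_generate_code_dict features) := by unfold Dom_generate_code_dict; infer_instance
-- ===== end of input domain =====

-- B replaces itertools.combinations + per-subset char-array mutation with a bottom-up
-- table of (code, value) rows built by prefixing '1'/'0' over the feature list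
-- (alternative decomposition, same order and cost).


-- ===== PORT A =====
-- exact port of the library call itertools.combinations over a list, lexicographic order
def combL {α : Type} : List α → Nat → List (List α)
  | _, 0 => [[]]
  | [], _+1 => []
  | x :: xs, r+1 => ((combL xs r).map (fun c => x :: c)) ++ combL xs (r+1)

-- code[index] = '1' is List.set and features[index] is List.getD: index comes from
-- range(len(features)), so it is always in range and these are exact.
def generate_code_dict (features : List String) : List (String × List String) :=
  let n := features.length
  let d := (PySem.List.pyRange 1 ((n : Int) + 1) 1).foldl (fun d r =>
    let combinations_list := combL (List.range n) r.toNat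
    combinations_list.foldl (fun d comb =>
      let cv := comb.foldl
        (fun (cv : List Char × List String) index =>
          (cv.1.set index '1', cv.2 ++ [features.getD index ""]))
        (List.replicate n '0', ([] : List String))
      d.insert (String.ofList cv.1) cv.2) d) PySem.Dict.empty
  ((d.insert "00000000" ["BPBGClass_None"]).items)

-- ===== PORT B =====
-- "1" + c is ported as String.ofList ('1' :: c.toList): exact for string concatenation;
-- table[r] for r in range is List.getD (always in range)
def tableStep (f : String) (t : List (List (String × List String))) : List (List (String × List String)) :=
  ((t.getD 0 []).map (fun cv => (String.ofList ('0' :: cv.1.toList), cv.2))) ::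
  (List.range' 1 t.length).map (fun r =>
    ((t.getD (r - 1) []).map (fun cv => (String.ofList ('1' :: cv.1.toList), f :: cv.2))) ++
    (if r < t.length then (t.getD r []).map (fun cv => (String.ofList ('0' :: cv.1.toList), cv.2)) else []))

def generate_code_dict_alt (features : List String) : List (String × List String) :=
  let table := features.reverse.foldl (fun t f => tableStep f t) [[("", ([] : List String))]]
  let d := (PySem.List.pyRange 1 ((features.length : Int) + 1) 1).foldl (fun d r =>
    (table.getD r.toNat []).foldl (fun d cv => d.insert cv.1 cv.2) d) PySem.Dict.empty
  ((d.insert "00000000" ["BPBGClass_None"]).items)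

-- ===== PRECONDITION & SPEC =====
def Spec_generate_code_dict (features : List String) (out : List (String × List String)) : Prop := out = generate_code_dict_alt features
instance (features : List String) (out : List (String × List String)) : Decidable (Spec_generate_code_dict features out) := by unfold Spec_generate_code_dict; infer_instance

-- ===== CLAIM (what is proved, stated in full; the proofs are below) =====
def Claim_equal_generate_code_dict : Prop := ∀ (features : List String), Dom_generate_code_dict features → Spec_generate_code_dict features (generate_code_dict features)

-- ===== LEMMAS AND PROOFS =====

-- the rows of B's table[r], described recursively (proof-only characterisation)
def rows : List String → Nat → List (String × List String)
  | feats, 0 => [(String.ofList (List.replicate feats.length '0'), [])]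
  | [], _+1 => []
  | first :: rest, r+1 =>
      ((rows rest r).map (fun cv => (String.ofList ('1' :: cv.1.toList), first :: cv.2))) ++
      ((rows rest (r+1)).map (fun cv => (String.ofList ('0' :: cv.1.toList), cv.2)))
  termination_by feats _ => feats.length

-- A's per-combination pair loop splits into the code fold and a map for the values
theorem foldl_step_split (feats : List String) (comb : List Nat) (code : List Char) (vals : List String) :
    comb.foldl
      (fun (cv : List Char × List String) index =>
        (cv.1.set index '1', cv.2 ++ [feats.getD index ""])) (code, vals)
    = (comb.foldl (fun co i => co.set i '1') code,
       vals ++ comb.map (fun i => feats.getD i "")) := by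
  induction comb generalizing code vals with
  | nil => simp
  | cons i c ih => rw [List.foldl_cons, ih]; simp

-- setting shifted indices leaves the head untouched
theorem foldl_set_shift (c : List Nat) (ch : Char) (l : List Char) :
    (c.map Nat.succ).foldl (fun co i => co.set i '1') (ch :: l)
    = ch :: c.foldl (fun co i => co.set i '1') l := by
  induction c generalizing l with
  | nil => simp
  | cons i c ih => simp [ih]

-- functoriality of combinations
theorem combL_map {α β : Type} (g : α → β) (l : List α) (r : Nat) :
    combL (l.map g) r = (combL l r).map (List.map g) := by
  induction l generalizing r with
  | nil => cases r <;> simp [combL]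
  | cons x xs ih =>
    cases r with
    | zero => simp [combL]
    | succ r => simp [combL, ih, List.map_map, Function.comp_def]

-- the main bridge: A's rows for size r, in order, are exactly B's rows
theorem rows_eq (feats : List String) (r : Nat) :
    (combL (List.range feats.length) r).map (fun comb =>
      let cv := comb.foldl
        (fun (cv : List Char × List String) index =>
          (cv.1.set index '1', cv.2 ++ [feats.getD index ""]))
        (List.replicate feats.length '0', ([] : List String))
      (String.ofList cv.1, cv.2))
    = rows feats r := by
  induction feats generalizing r with
  | nil => cases r <;> simp [combL, rows]
  | cons f rest ih =>
    cases r with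
    | zero => simp [combL, rows]
    | succ r =>
      simp only [List.length_cons, List.range_succ_eq_map, combL, combL_map,
        List.map_append, List.map_map, rows]
      rw [← ih r, ← ih (r+1), List.map_map, List.map_map]
      congr 1
      · apply List.map_congr_left
        intro comb _
        simp only [Function.comp_apply, foldl_step_split, List.foldl_cons,
          List.replicate_succ, List.set_cons_zero, foldl_set_shift,
          List.map_map, List.map_cons, List.getD_cons_zero, List.getD_cons_succ,
          Function.comp_def, List.nil_append, String.toList_ofList]
      · apply List.map_congr_left
        intro comb _
        simp only [Function.comp_apply, foldl_step_split,
          List.replicate_succ, foldl_set_shift,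
          List.map_map, List.getD_cons_succ, Function.comp_def, List.nil_append, String.toList_ofList]

-- no subsets larger than the list
theorem rows_gt (feats : List String) (r : Nat) (h : feats.length < r) : rows feats r = [] := by
  induction feats generalizing r with
  | nil => cases r with
    | zero => omega
    | succ r => simp [rows]
  | cons f rest ih =>
    cases r with
    | zero => simp at h
    | succ r =>
      simp only [List.length_cons] at h
      simp [rows, ih r (by omega), ih (r+1) (by omega)]

-- one step of B's table loop advances the recursive description by one feature
theorem tableStep_eq (f : String) (rest : List String) :
    tableStep f ((List.range (rest.length + 1)).map (rows rest))
    = (List.range (rest.length + 2)).map (rows (f :: rest)) := by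
  have hlen : ((List.range (rest.length + 1)).map (rows rest)).length = rest.length + 1 := by simp
  unfold tableStep
  rw [hlen]
  conv_rhs => rw [show rest.length + 2 = (rest.length + 1) + 1 from rfl, List.range_succ_eq_map]
  rw [List.map_cons]
  congr 1
  · rw [PySem.List.getD_map_range _ _ _ _ (by omega)]
    simp [rows, List.replicate_succ]
  · rw [List.range'_eq_map_range, List.map_map, List.map_map]
    apply List.map_congr_left
    intro i hi
    rw [List.mem_range] at hi
    simp only [Function.comp_apply]
    rw [show 1 + i - 1 = i from by omega]
    rw [PySem.List.getD_map_range _ _ _ _ (by omega)]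
    by_cases hi' : i < rest.length
    · rw [if_pos (by omega), PySem.List.getD_map_range _ _ _ _ (by omega)]
      rw [show 1 + i = i + 1 from by omega]
      simp [rows]
    · rw [if_neg (by omega)]
      have hieq : i = rest.length := by omega
      subst hieq
      simp [rows, rows_gt rest (rest.length + 1) (by omega)]

-- B's table is the list of rows for every size
theorem table_eq (feats : List String) :
    feats.reverse.foldl (fun t f => tableStep f t) [[("", ([] : List String))]]
    = (List.range (feats.length + 1)).map (rows feats) := by
  rw [List.foldl_reverse]
  induction feats with
  | nil => simp [rows]
  | cons f rest ih =>
    rw [List.foldr_cons, ih, tableStep_eq]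
    rfl

-- the per-r dict-building loop bodies of the two ports agree on the ranged r
theorem body_eq (features : List String) (d : PySem.Dict String (List String)) (r : Int)
    (hr : r ∈ PySem.List.pyRange 1 ((features.length : Int) + 1) 1) :
    (combL (List.range features.length) r.toNat).foldl (fun d comb =>
      let cv := comb.foldl
        (fun (cv : List Char × List String) index =>
          (cv.1.set index '1', cv.2 ++ [features.getD index ""]))
        (List.replicate features.length '0', ([] : List String))
      d.insert (String.ofList cv.1) cv.2) d
    = (((List.range (features.length + 1)).map (rows features)).getD r.toNat []).foldl
        (fun d cv => d.insert cv.1 cv.2) d := by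
  rw [PySem.List.mem_pyRange_one] at hr
  rw [PySem.List.getD_map_range _ _ _ _ (by omega), ← rows_eq, List.foldl_map]

-- ===== VERDICT (by name: the statement is the Claim_ definition above) =====
theorem generate_code_dict_spec : Claim_equal_generate_code_dict := by
  intro features _
  show generate_code_dict features = generate_code_dict_alt features
  simp only [generate_code_dict, generate_code_dict_alt, table_eq]
  rw [PySem.List.foldl_congr_mem _ _ _ _ (fun d r hr => body_eq features d r hr)]
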